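-- pv_equiv track=rewrite | github.com/3k3n3/50_days_of_python | word_index.py | word_index
-- ===== SOURCE A (Python) =====
-- def word_index(l: list) -> int:
--     words = set([len(x) for x in l])
--     if len(words) == 1:
--         return 0
--     else:
--         for x in l:
--             if max(words) == len(x):
--                 return (l.index(x))
-- ===== SOURCE B (Python) =====
-- def word_index(l: list) -> int:
--     mx, mn, idx = -1, -1, 0
--     for i, x in enumerate(l):
--         n = len(x)
--         if n > mx:
--             mx, idx = n, i
--         if mn < 0 or n < mn:
--             mn = n
--     return 0 if mn == mx else idx
-- ===== Notes on version B (the rewrite author's own statement) =====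
-- stated objective: alternative
-- what changed: Replaces A's set-of-lengths + per-element max(words) recomputation + l.index rescan with one accumulating pass over enumerate(l) that maintains max length, min length and the first index of the max.
-- outside the precondition, e.g. on word_index([]): A returns None, B returns 0
import Mathlib
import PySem

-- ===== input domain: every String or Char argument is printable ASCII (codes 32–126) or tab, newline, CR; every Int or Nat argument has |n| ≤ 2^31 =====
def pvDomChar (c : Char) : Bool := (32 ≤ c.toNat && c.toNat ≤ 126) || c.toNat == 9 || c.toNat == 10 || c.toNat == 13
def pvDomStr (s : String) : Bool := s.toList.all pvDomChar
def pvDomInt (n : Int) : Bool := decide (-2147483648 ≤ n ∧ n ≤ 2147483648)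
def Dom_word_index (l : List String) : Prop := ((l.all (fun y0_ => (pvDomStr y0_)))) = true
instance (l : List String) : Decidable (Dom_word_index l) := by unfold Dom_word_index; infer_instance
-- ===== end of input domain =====

-- B replaces A's set-of-lengths, per-element max() recomputation and l.index rescan by a single
-- accumulating pass (max length, min length, first index of the max); Pre_ excludes the empty
-- list, on which A returns None instead of an int.


-- ===== PORT A =====
-- for x in l: if max(words) == len(x): return l.index(x)   (falling off the loop = Python's None; 0 here, outside Pre_)
def wordIndexFind (l : List String) (words : PySem.Set Int) : List String → Int
  | [] => 0
  | x :: rest =>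
    if PySem.List.max? words (fun y => y) = some (PySem.Str.len x) then
      (((PySem.List.index? l x).getD 0 : Nat) : Int)
    else wordIndexFind l words rest

def word_index (l : List String) : Int :=
  let words : PySem.Set Int := PySem.Set.ofList (l.map (fun x => PySem.Str.len x))
  if PySem.Set.len words == 1 then 0
  else wordIndexFind l words l

-- ===== PORT B =====
def altStep (st : Int × Int × Int) (p : Int × String) : Int × Int × Int :=
  let n := PySem.Str.len p.2
  let st1 := if n > st.1 then (n, st.2.1, p.1) else st
  if st1.2.1 < 0 || n < st1.2.1 then (st1.1, n, st1.2.2) else st1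

def word_index_alt (l : List String) : Int :=
  let st := (PySem.List.enumerate l 0).foldl altStep (-1, -1, 0)
  if st.2.1 == st.1 then 0 else st.2.2

-- ===== PRECONDITION & SPEC =====
-- Pre_ excludes only the empty list: there A falls off the function and returns None, not an int.
def Pre_word_index (l : List String) : Prop := l ≠ []
instance (l : List String) : Decidable (Pre_word_index l) := by unfold Pre_word_index; infer_instance
def pvWitness_word_index : List String := ["ab", "c"]

def Spec_word_index (l : List String) (out : Int) : Prop := out = word_index_alt l
instance (l : List String) (out : Int) : Decidable (Spec_word_index l out) := by unfold Spec_word_index; infer_instance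

-- ===== CLAIM (what is proved, stated in full; the proofs are below) =====
def Claim_equal_word_index : Prop := ∀ (l : List String), Dom_word_index l → Pre_word_index l → Spec_word_index l (word_index l)

-- ===== LEMMAS AND PROOFS =====

-- length of a string, and the three accumulated quantities of B
def slen (s : String) : Int := PySem.Str.len s
def mxL (l : List String) : Int := (l.map slen).foldl max (-1)
def mnL : List String → Int
  | [] => -1
  | x :: t => (t.map slen).foldl min (slen x)
def fiL (l : List String) : Int := (l.findIdx (fun s => slen s == mxL l) : Int)

theorem slen_nonneg (s : String) : 0 ≤ slen s := by
  simp [slen, PySem.Str.len_eq]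

theorem mxL_append (l : List String) (y : String) : mxL (l ++ [y]) = max (mxL l) (slen y) := by
  simp [mxL, List.foldl_append]

theorem mnL_append (x : String) (t : List String) (y : String) :
    mnL ((x :: t) ++ [y]) = min (mnL (x :: t)) (slen y) := by
  simp [mnL, List.foldl_append]

theorem le_mxL (l : List String) (s : String) (hs : s ∈ l) : slen s ≤ mxL l :=
  (PySem.List.le_foldl_max (l.map slen) (-1)).2 (slen s) (List.mem_map_of_mem hs)

theorem mxL_mem (x : String) (t : List String) : mxL (x :: t) ∈ (x :: t).map slen := by
  rcases PySem.List.foldl_max_mem ((x :: t).map slen) (-1) with h | h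
  · exfalso
    have := le_mxL (x :: t) x (by simp)
    have := slen_nonneg x
    simp only [mxL] at *; omega
  · exact (mxL.eq_1 _) ▸ h

theorem foldl_min_ge (t : List Int) (a c : Int) (ha : c ≤ a) (ht : ∀ y ∈ t, c ≤ y) :
    c ≤ t.foldl min a := by
  induction t generalizing a with
  | nil => exact ha
  | cons y ys ih =>
    exact ih _ (le_min ha (ht y (by simp))) (fun z hz => ht z (by simp [hz]))

theorem mnL_nonneg (x : String) (t : List String) : 0 ≤ mnL (x :: t) := by
  refine foldl_min_ge _ _ _ (slen_nonneg x) ?_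
  intro y hy
  rcases List.mem_map.1 hy with ⟨s, _, rfl⟩
  exact slen_nonneg s

theorem mnL_le (l : List String) (s : String) (hs : s ∈ l) (hl : l ≠ []) : mnL l ≤ slen s := by
  match l with
  | x :: t =>
    rcases List.mem_cons.1 hs with rfl | hs
    · exact (PySem.List.foldl_min_le (t.map slen) (slen s)).1
    · exact (PySem.List.foldl_min_le (t.map slen) (slen x)).2 _ (List.mem_map_of_mem hs)

-- min = max iff all lengths agree
theorem mnL_eq_mxL_iff (x : String) (t : List String) :
    mnL (x :: t) = mxL (x :: t) ↔ ∀ s ∈ (x :: t), slen s = slen x := by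
  constructor
  · intro h s hs
    have h1 := mnL_le (x :: t) s hs (by simp)
    have h2 := le_mxL (x :: t) s hs
    have h3 := mnL_le (x :: t) x (by simp) (by simp)
    have h4 := le_mxL (x :: t) x (by simp)
    omega
  · intro h
    have hmx : mxL (x :: t) = slen x := by
      rcases List.mem_map.1 (mxL_mem x t) with ⟨s, hs, heq⟩
      rw [← heq, h s hs]
    have hmn : mnL (x :: t) = slen x := by
      refine le_antisymm (mnL_le (x :: t) x (by simp) (by simp)) ?_
      refine foldl_min_ge _ _ _ le_rfl ?_
      intro y hy
      rcases List.mem_map.1 hy with ⟨s, hs, rfl⟩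
      exact le_of_eq (h s (by simp [hs])).symm
    rw [hmn, hmx]

-- the set of lengths has one element iff all lengths agree
theorem set_len_one_iff (x : String) (t : List String) :
    PySem.Set.len (PySem.Set.ofList ((x :: t).map (fun s => PySem.Str.len s))) = 1 ↔
      ∀ s ∈ (x :: t), slen s = slen x := by
  have hmem : ∀ (v : Int), v ∈ PySem.Set.ofList ((x :: t).map (fun s => PySem.Str.len s)) ↔
      v ∈ (x :: t).map (fun s => PySem.Str.len s) := fun v => PySem.Set.mem_ofList _ v
  have hnd := PySem.Set.nodup_ofList ((x :: t).map (fun s => PySem.Str.len s))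
  have hx : slen x ∈ PySem.Set.ofList ((x :: t).map (fun s => PySem.Str.len s)) := by
    rw [hmem]; exact List.mem_map_of_mem (by simp)
  constructor
  · intro h s hs
    have hlen : (PySem.Set.ofList ((x :: t).map (fun s => PySem.Str.len s))).length = 1 := by
      simp only [PySem.Set.len] at h
      omega
    rcases List.length_eq_one_iff.1 hlen with ⟨a, ha⟩
    have hs' : slen s ∈ PySem.Set.ofList ((x :: t).map (fun s => PySem.Str.len s)) := by
      rw [hmem]; exact List.mem_map_of_mem hs
    rw [ha, List.mem_singleton] at hx hs'
    rw [hs', hx]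
  · intro h
    have : PySem.Set.ofList ((x :: t).map (fun s => PySem.Str.len s)) = [slen x] := by
      have hall : ∀ v ∈ PySem.Set.ofList ((x :: t).map (fun s => PySem.Str.len s)), v = slen x := by
        intro v hv
        rcases List.mem_map.1 ((hmem v).1 hv) with ⟨s, hs, rfl⟩
        exact h s hs
      match hS : PySem.Set.ofList ((x :: t).map (fun s => PySem.Str.len s)) with
      | [] => rw [hS] at hx; exact absurd hx (by simp)
      | [a] => rw [hS] at hall; simp [hall a (by simp)]
      | a :: b :: r =>
        rw [hS] at hall hnd
        have ha := hall a (by simp)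
        have hb := hall b (by simp)
        rw [List.nodup_cons] at hnd
        exact absurd (by simp [ha, hb] : a ∈ b :: r) hnd.1
    rw [this]
    simp [PySem.Set.len]

-- max(words) = mxL
theorem max_words_eq (x : String) (t : List String) :
    PySem.List.max? (PySem.Set.ofList ((x :: t).map (fun s => PySem.Str.len s))) (fun y => y)
      = some (mxL (x :: t)) := by
  have hx : slen x ∈ PySem.Set.ofList ((x :: t).map (fun s => PySem.Str.len s)) := by
    rw [PySem.Set.mem_ofList]; exact List.mem_map_of_mem (by simp)
  match hm : PySem.List.max? (PySem.Set.ofList ((x :: t).map (fun s => PySem.Str.len s))) (fun y => y) with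
  | none =>
    rw [PySem.List.max?_eq_none_iff] at hm
    rw [hm] at hx
    exact absurd hx (by simp)
  | some m =>
    have hmem := PySem.List.max?_mem hm
    rw [PySem.Set.mem_ofList] at hmem
    rcases List.mem_map.1 hmem with ⟨s, hs, rfl⟩
    have h1 : slen s ≤ mxL (x :: t) := le_mxL _ s hs
    have hmx : mxL (x :: t) ∈ PySem.Set.ofList ((x :: t).map (fun s => PySem.Str.len s)) := by
      rw [PySem.Set.mem_ofList]
      exact mxL_mem x t
    have h2 := PySem.List.max?_isMax hm _ hmx
    simp only [slen] at h1 h2 ⊢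
    congr 1
    omega

-- A's scan returns the first index of the max length
theorem loopA (words : PySem.Set Int) (M : Int)
    (hM : PySem.List.max? words (fun y => y) = some M) :
    ∀ (rem pre : List String), (∀ s ∈ pre, slen s ≠ M) → (∃ s ∈ rem, slen s = M) →
      wordIndexFind (pre ++ rem) words rem = ((pre ++ rem).findIdx (fun s => slen s == M) : Int) := by
  intro rem
  induction rem with
  | nil =>
    rintro pre _ ⟨s, hs, _⟩
    exact absurd hs (by simp)
  | cons y rest ih =>
    intro pre hpre hex
    rw [wordIndexFind, hM]
    by_cases hy : slen y = M
    · rw [if_pos (by rw [show PySem.Str.len y = M from hy])]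
      have hnot : y ∉ pre := fun hmem => hpre y hmem hy
      have hidx : PySem.List.index? (pre ++ y :: rest) y = some pre.length := by
        rw [PySem.List.index?_eq_some_iff]
        exact ⟨pre, rest, rfl, rfl, hnot⟩
      rw [hidx]
      have hfind : (pre ++ y :: rest).findIdx (fun s => slen s == M) = pre.length := by
        rw [List.findIdx_append]
        have hnone : ¬ (List.findIdx (fun s => slen s == M) pre < pre.length) := by
          rw [List.findIdx_lt_length]
          rintro ⟨s, hs, hp⟩
          exact hpre s hs (beq_iff_eq.1 hp)
        rw [if_neg hnone, List.findIdx_cons]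
        simp [hy]
      rw [hfind]
      simp
    · rw [if_neg (fun h : some M = some (PySem.Str.len y) => hy (Option.some.inj h).symm)]
      have hex' : ∃ s ∈ rest, slen s = M := by
        rcases hex with ⟨s, hs, hsM⟩
        rcases List.mem_cons.1 hs with rfl | hs
        · exact absurd hsM hy
        · exact ⟨s, hs, hsM⟩
      have := ih (pre ++ [y]) (by
        intro s hs
        rcases List.mem_append.1 hs with hs | hs
        · exact hpre s hs
        · rw [List.mem_singleton.1 hs]; exact hy) hex'
      simpa using this

-- B's one step from the state of a nonempty prefix
theorem step_ok (pre : List String) (hpre : pre ≠ []) (y : String) :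
    altStep (mxL pre, mnL pre, fiL pre) ((pre.length : Int), y)
      = (mxL (pre ++ [y]), mnL (pre ++ [y]), fiL (pre ++ [y])) := by
  match pre with
  | x :: t =>
    have h0 : 0 ≤ mnL (x :: t) := mnL_nonneg x t
    have hmnx : mnL (x :: t) ≤ mxL (x :: t) :=
      le_trans (mnL_le _ x (by simp) (by simp)) (le_mxL _ x (by simp))
    have hy0 := slen_nonneg y
    by_cases hgt : mxL (x :: t) < slen y
    · have hmx' : mxL ((x :: t) ++ [y]) = slen y := by rw [mxL_append]; omega
      have hfi : fiL ((x :: t) ++ [y]) = (((x :: t).length : Nat) : Int) := by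
        unfold fiL
        rw [hmx', List.findIdx_append]
        have hnone : ¬ (List.findIdx (fun s => slen s == slen y) (x :: t) < (x :: t).length) := by
          rw [List.findIdx_lt_length]
          rintro ⟨s, hs, hp⟩
          have := le_mxL (x :: t) s hs
          rw [beq_iff_eq] at hp
          omega
        rw [if_neg hnone, List.findIdx_cons]
        simp
      rw [mnL_append, hfi]
      simp only [altStep]
      rw [if_pos (show PySem.Str.len y > mxL (x :: t) from hgt)]
      rw [if_neg (by simp only [Bool.or_eq_true, decide_eq_true_eq, slen] at hgt ⊢; omega)]
      have : min (mnL (x :: t)) (slen y) = mnL (x :: t) := by simp only [slen] at hgt ⊢; omega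
      rw [this, hmx']
      simp [slen]
    · rw [not_lt] at hgt
      have hmx' : mxL ((x :: t) ++ [y]) = mxL (x :: t) := by rw [mxL_append]; omega
      have hfi : fiL ((x :: t) ++ [y]) = fiL (x :: t) := by
        unfold fiL
        rw [hmx', List.findIdx_append]
        have hsome : List.findIdx (fun s => slen s == mxL (x :: t)) (x :: t) < (x :: t).length := by
          rw [List.findIdx_lt_length]
          rcases List.mem_map.1 (mxL_mem x t) with ⟨s, hs, he⟩
          exact ⟨s, hs, beq_iff_eq.2 he⟩
        rw [if_pos hsome]
      rw [mnL_append, hfi, hmx']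
      simp only [altStep]
      rw [if_neg (show ¬ (PySem.Str.len y > mxL (x :: t)) by simp only [slen] at hgt; omega)]
      by_cases hlt : slen y < mnL (x :: t)
      · rw [if_pos (by simp only [Bool.or_eq_true, decide_eq_true_eq]; right; exact hlt)]
        have : min (mnL (x :: t)) (slen y) = slen y := by omega
        rw [this]
        simp [slen]
      · rw [if_neg (by simp only [Bool.or_eq_true, decide_eq_true_eq, slen] at hlt ⊢; omega)]
        have : min (mnL (x :: t)) (slen y) = mnL (x :: t) := by omega
        rw [this]

-- B's fold from the state of a nonempty prefix
theorem foldB (rem : List String) : ∀ (pre : List String), pre ≠ [] →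
    (PySem.List.enumerate rem (pre.length : Int)).foldl altStep (mxL pre, mnL pre, fiL pre)
      = (mxL (pre ++ rem), mnL (pre ++ rem), fiL (pre ++ rem)) := by
  induction rem with
  | nil =>
    intro pre hpre
    simp [PySem.List.enumerate]
  | cons y rest ih =>
    intro pre hpre
    rw [PySem.List.enumerate_cons, List.foldl_cons, step_ok pre hpre y]
    rw [show ((pre.length : Int) + 1) = (((pre ++ [y]).length : Nat) : Int) by simp]
    rw [ih (pre ++ [y]) (by simp)]
    simp

theorem B_char (x : String) (t : List String) :
    word_index_alt (x :: t)
      = if mnL (x :: t) = mxL (x :: t) then 0 else fiL (x :: t) := by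
  have hx0 := slen_nonneg x
  have hstep : altStep (-1, -1, 0) ((0 : Int), x) = (mxL [x], mnL [x], fiL [x]) := by
    have hmx : mxL [x] = slen x := by simp only [mxL, List.map, List.foldl]; omega
    have hmn : mnL [x] = slen x := by simp [mnL]
    have hfi : fiL [x] = 0 := by
      unfold fiL
      rw [hmx, List.findIdx_cons]
      simp
    rw [hmx, hmn, hfi]
    simp only [altStep]
    rw [if_pos (show PySem.Str.len x > (-1 : Int) from by simp only [slen] at hx0; omega)]
    rw [if_pos (by simp)]
    simp [slen]
  unfold word_index_alt
  rw [PySem.List.enumerate_cons, List.foldl_cons, hstep]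
  rw [show ((0 : Int) + 1) = ((([x] : List String).length : Nat) : Int) by simp]
  rw [foldB t [x] (by simp)]
  simp only [List.singleton_append]
  by_cases h : mnL (x :: t) = mxL (x :: t)
  · rw [if_pos h, if_pos (by simp [h])]
  · rw [if_neg h, if_neg (by simp [h])]

theorem A_char (x : String) (t : List String) :
    word_index (x :: t)
      = if mnL (x :: t) = mxL (x :: t) then 0 else fiL (x :: t) := by
  unfold word_index
  by_cases hall : ∀ s ∈ (x :: t), slen s = slen x
  · rw [if_pos (by rw [beq_iff_eq]; exact (set_len_one_iff x t).2 hall)]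
    rw [if_pos ((mnL_eq_mxL_iff x t).2 hall)]
  · have hset : ¬ (PySem.Set.len (PySem.Set.ofList ((x :: t).map (fun s => PySem.Str.len s))) = 1) :=
      fun h => hall ((set_len_one_iff x t).1 h)
    rw [if_neg (by rw [beq_iff_eq]; exact hset)]
    rw [if_neg (fun h => hall ((mnL_eq_mxL_iff x t).1 h))]
    have hex : ∃ s ∈ (x :: t), slen s = mxL (x :: t) := by
      rcases List.mem_map.1 (mxL_mem x t) with ⟨s, hs, he⟩
      exact ⟨s, hs, he⟩
    have := loopA _ _ (max_words_eq x t) (x :: t) [] (by simp) hex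
    simp only [List.nil_append] at this
    rw [this]
    rfl

-- ===== VERDICT (by name: the statement is the Claim_ definition above) =====
theorem word_index_spec : Claim_equal_word_index := by
  intro l _ hpre
  match l with
  | [] => exact absurd rfl hpre
  | x :: t => unfold Spec_word_index; rw [A_char, B_char]
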